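-- pv_equiv track=rewrite | github.com/dotadiw23/PageReplacementAlgorithms | fifo.py | findFirstInput
-- ===== SOURCE A (Python) =====
-- def findFirstInput(memorySpaces, processesQueue):
--     inputsOrder = [] #Each index in this array correspond to the index in the memory space
--
--     for i in range (len(memorySpaces)):
--         for j in range(len(processesQueue)):
--             if(memorySpaces[i] == processesQueue[j]):
--                 inputsOrder.append(j)
--                 break
--
--     firstInputIndex = min(inputsOrder) #Filter the min index
--     firstInput = processesQueue[int(firstInputIndex)]; #Asing the value of the first input
--     processesQueue[int(firstInputIndex)] = "" #Remove the input because now, is an output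
--
--     return firstInput
-- ===== SOURCE B (Python) =====
-- def findFirstInput(memorySpaces, processesQueue):
--     firstInputIndex = min(j for j, p in enumerate(processesQueue) if p in memorySpaces)
--     firstInput = processesQueue[firstInputIndex]
--     processesQueue[firstInputIndex] = ""
--     return firstInput
-- ===== Notes on version B (the rewrite author's own statement) =====
-- stated objective: simpler
-- what changed: Replaces A's nested memory-by-queue scan that collects first-match indices and then takes their min with a single pass over the queue taking the min index whose element is in memorySpaces (the smallest queue index held in memory is necessarily a first occurrence, so the minima coincide).
import Mathlib
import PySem

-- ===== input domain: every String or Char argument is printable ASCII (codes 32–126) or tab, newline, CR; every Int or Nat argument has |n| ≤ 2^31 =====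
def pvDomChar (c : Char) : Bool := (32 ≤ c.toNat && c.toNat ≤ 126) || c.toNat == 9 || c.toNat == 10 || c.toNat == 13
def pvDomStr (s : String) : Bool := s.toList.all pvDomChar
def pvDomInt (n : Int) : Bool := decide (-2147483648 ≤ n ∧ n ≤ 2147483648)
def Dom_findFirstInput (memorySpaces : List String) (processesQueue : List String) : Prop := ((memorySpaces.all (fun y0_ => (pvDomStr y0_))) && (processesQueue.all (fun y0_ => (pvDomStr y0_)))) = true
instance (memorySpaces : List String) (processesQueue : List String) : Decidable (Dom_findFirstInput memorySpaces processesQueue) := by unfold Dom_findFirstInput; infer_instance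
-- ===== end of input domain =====

-- B replaces A's nested collect-then-min scan by one pass over the queue (objective: simpler).
-- Both Pythons mutate processesQueue identically (blank the chosen slot); the theorems are about the return value.

-- ===== PORT A =====
-- inner 'for j in range(len(processesQueue)): if …: append j; break' — first match index, or none
def pvInnerA (m : String) : List String → Nat → Option Nat
  | [], _ => none
  | q :: qs, j => if m == q then some j else pvInnerA m qs (j + 1)

def findFirstInput (memorySpaces : List String) (processesQueue : List String) : String :=
  let inputsOrder : List Nat := memorySpaces.foldl (fun acc m =>
    match pvInnerA m processesQueue 0 with
    | some j => acc ++ [j]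
    | none => acc) []
  match PySem.List.min? inputsOrder (fun x => x) with   -- min(inputsOrder); none = ValueError (outside Pre_)
  | some i => ((PySem.List.pyGet? processesQueue (i : Int)).getD "")
  | none => ""

-- ===== PORT B =====
def findFirstInput_alt (memorySpaces : List String) (processesQueue : List String) : String :=
  let idxs : List Int := ((PySem.List.enumerate processesQueue).filter
    (fun p => memorySpaces.contains p.2)).map (·.1)
  match PySem.List.min? idxs (fun x => x) with          -- min(generator); none = ValueError (outside Pre_)
  | some i => (PySem.List.pyGet? processesQueue i).getD ""
  | none => ""

-- ===== PRECONDITION & SPEC =====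
-- Pre_ excludes exactly the inputs on which min() raises ValueError in BOTH Pythons:
-- no element of memorySpaces occurs in processesQueue.
def Pre_findFirstInput (memorySpaces : List String) (processesQueue : List String) : Prop :=
  (memorySpaces.any (fun m => processesQueue.contains m)) = true
instance (memorySpaces : List String) (processesQueue : List String) : Decidable (Pre_findFirstInput memorySpaces processesQueue) := by unfold Pre_findFirstInput; infer_instance

def pvWitness_findFirstInput : List String × List String := (["b", "a"], ["c", "a", "b"])

def Spec_findFirstInput (memorySpaces : List String) (processesQueue : List String) (out : String) : Prop := out = findFirstInput_alt memorySpaces processesQueue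
instance (memorySpaces : List String) (processesQueue : List String) (out : String) : Decidable (Spec_findFirstInput memorySpaces processesQueue out) := by unfold Spec_findFirstInput; infer_instance

-- ===== CLAIM (what is proved, stated in full; the proofs are below) =====
def Claim_equal_findFirstInput : Prop := ∀ (memorySpaces : List String) (processesQueue : List String), Dom_findFirstInput memorySpaces processesQueue → Pre_findFirstInput memorySpaces processesQueue → Spec_findFirstInput memorySpaces processesQueue (findFirstInput memorySpaces processesQueue)

-- ===== LEMMAS AND PROOFS =====

-- pvInnerA is index? shifted by the running counter
theorem pvInnerA_eq_index? (m : String) (qs : List String) (c : Nat) :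
    pvInnerA m qs c = (PySem.List.index? qs m).map (· + c) := by
  induction qs generalizing c with
  | nil => simp [pvInnerA, PySem.List.index?]
  | cons q qs ih =>
    by_cases h : m = q
    · subst h
      rw [PySem.List.index?_cons_self]
      simp [pvInnerA]
    · have hstep : pvInnerA m (q :: qs) c = pvInnerA m qs (c + 1) := by
        simp [pvInnerA, h]
      rw [PySem.List.index?_cons_of_ne _ (Ne.symm h), hstep, ih]
      cases PySem.List.index? qs m
      · simp
      · simp; omega

-- membership in A's inputsOrder
theorem mem_inputsOrder (ms qs : List String) (acc : List Nat) (j : Nat) :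
    j ∈ ms.foldl (fun acc m =>
      match pvInnerA m qs 0 with
      | some j => acc ++ [j]
      | none => acc) acc ↔ j ∈ acc ∨ ∃ m ∈ ms, pvInnerA m qs 0 = some j := by
  induction ms generalizing acc with
  | nil => simp
  | cons m ms ih =>
    simp only [List.foldl_cons]
    cases h : pvInnerA m qs 0 with
    | none => simp [h, ih]
    | some k =>
      simp only [ih, List.mem_append, List.mem_cons, List.not_mem_nil, or_false]
      constructor
      · rintro ((hj | rfl) | ⟨m', hm', hs⟩)
        · exact Or.inl hj
        · exact Or.inr ⟨m, Or.inl rfl, h⟩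
        · exact Or.inr ⟨m', Or.inr hm', hs⟩
      · rintro (hj | ⟨m', (rfl | hm'), hs⟩)
        · exact Or.inl (Or.inl hj)
        · exact Or.inl (Or.inr (Option.some.inj (h ▸ hs)).symm)
        · exact Or.inr ⟨m', hm', hs⟩

-- membership in B's idxs
theorem mem_idxs (ms qs : List String) (n : Int) :
    n ∈ ((PySem.List.enumerate qs).filter (fun p => ms.contains p.2)).map (·.1) ↔
      ∃ (k : Nat), ∃ (hk : k < qs.length), n = (k : Int) ∧ qs[k] ∈ ms := by
  simp only [List.mem_map, List.mem_filter, PySem.List.mem_enumerate_iff]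
  constructor
  · rintro ⟨p, ⟨⟨k, hk, rfl⟩, hmem⟩, rfl⟩
    exact ⟨k, hk, by simp, by simpa using hmem⟩
  · rintro ⟨k, hk, rfl, hmem⟩
    exact ⟨((k : Int), qs[k]), ⟨⟨k, hk, by simp⟩, by simpa using hmem⟩, rfl⟩

-- characterisation of the first-occurrence index via index?
theorem index?_le_of_getElem (qs : List String) (j : Nat) (hj : j < qs.length) :
    ∃ k, PySem.List.index? qs qs[j] = some k ∧ k ≤ j ∧ ∃ hk : k < qs.length, qs[k] = qs[j] := by
  have hmem : qs[j] ∈ qs := List.getElem_mem hj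
  have hs : (PySem.List.index? qs qs[j]).isSome := (PySem.List.index?_isSome_iff _ _).2 hmem
  obtain ⟨k, hk⟩ := Option.isSome_iff_exists.1 hs
  obtain ⟨hklt, hkeq, hfirst⟩ := PySem.List.getElem_of_index?_eq_some hk
  refine ⟨k, hk, ?_, hklt, hkeq⟩
  by_contra h
  exact hfirst j (by omega) rfl

-- ===== VERDICT (by name: the statement is the Claim_ definition above) =====
theorem findFirstInput_spec : Claim_equal_findFirstInput := by
  intro ms qs _ hpre
  unfold Spec_findFirstInput findFirstInput findFirstInput_alt
  -- P j : j is a queue index whose element is in memory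
  obtain ⟨m0, hm0, hm0q⟩ : ∃ m ∈ ms, m ∈ qs := by
    simpa [Pre_findFirstInput, List.any_eq_true] using hpre
  -- A's list is nonempty: index? qs m0 is in it
  obtain ⟨j0, hj0⟩ := Option.isSome_iff_exists.1 ((PySem.List.index?_isSome_iff _ _).2 hm0q)
  set inputsOrder := ms.foldl (fun acc m =>
      match pvInnerA m qs 0 with
      | some j => acc ++ [j]
      | none => acc) ([] : List Nat) with hio
  have hj0mem : j0 ∈ inputsOrder := by
    rw [hio, mem_inputsOrder]
    exact Or.inr ⟨m0, hm0, by rw [pvInnerA_eq_index?, hj0]; simp⟩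
  -- hence min? is some a
  cases hA : PySem.List.min? inputsOrder (fun x => x) with
  | none =>
    rw [PySem.List.min?_eq_none_iff] at hA
    rw [hA] at hj0mem
    simp at hj0mem
  | some a =>
    have haMem : a ∈ inputsOrder := PySem.List.min?_mem hA
    have haMin : ∀ y ∈ inputsOrder, a ≤ y := fun y hy => PySem.List.min?_isMin hA y hy
    -- a is an index with qs[a] ∈ ms
    obtain ⟨ma, hma, hsa⟩ : ∃ m ∈ ms, pvInnerA m qs 0 = some a := by
      have := (mem_inputsOrder ms qs [] a).1 (by simpa [hio] using haMem)
      tauto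
    rw [pvInnerA_eq_index?] at hsa
    have hsa' : PySem.List.index? qs ma = some a := by
      cases h : PySem.List.index? qs ma with
      | none => rw [h] at hsa; simp at hsa
      | some v => rw [h] at hsa; simp at hsa; exact congrArg some hsa
    obtain ⟨halt, haeq, -⟩ := PySem.List.getElem_of_index?_eq_some hsa'
    -- B's list: (a : Int) is a member, and is minimal
    set idxs := ((PySem.List.enumerate qs).filter (fun p => ms.contains p.2)).map (·.1) with hidx
    have haB : (a : Int) ∈ idxs := by
      rw [hidx, mem_idxs]
      exact ⟨a, halt, rfl, haeq ▸ hma⟩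
    have haBmin : ∀ y ∈ idxs, (a : Int) ≤ y := by
      intro y hy
      rw [hidx, mem_idxs] at hy
      obtain ⟨k, hk, rfl, hkin⟩ := hy
      obtain ⟨k', hk', hk'le, hk'lt, hk'eq⟩ := index?_le_of_getElem qs k hk
      have hk'mem : k' ∈ inputsOrder := by
        rw [hio, mem_inputsOrder]
        exact Or.inr ⟨qs[k], hkin, by rw [pvInnerA_eq_index?, hk']; simp⟩
      have := haMin k' hk'mem
      exact_mod_cast Nat.le_trans this hk'le
    cases hB : PySem.List.min? idxs (fun x => x) with
    | none =>
      rw [PySem.List.min?_eq_none_iff] at hB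
      rw [hB] at haB
      simp at haB
    | some b =>
      have hbMem : b ∈ idxs := PySem.List.min?_mem hB
      have hbMin : ∀ y ∈ idxs, b ≤ y := fun y hy => PySem.List.min?_isMin hB y hy
      have hab : b = (a : Int) := le_antisymm (hbMin _ haB) (haBmin b hbMem)
      simp only [hA, hB, hab]
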